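-- pv_equiv track=rewrite | github.com/mikewarot/Bitgrid_python | bitgrid/cli/stream_text_w2e.py | select_active_rows
-- ===== SOURCE A (Python) =====
-- from typing import List, Tuple, Optional
--
-- def select_active_rows(height: int, phase_a_only: bool, lanes: Optional[int] = None) -> List[int]:
--     """Choose which row indices carry data. If phase_a_only, use even rows (y%2==0).
--     Optionally truncate to 'lanes' rows.
--     """
--     if phase_a_only:
--         rows = [y for y in range(height) if (y % 2 == 0)]
--     else:
--         rows = list(range(height))
--     if lanes is not None and lanes > 0:
--         rows = rows[:lanes]
--     return rows
-- ===== SOURCE B (Python) =====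
-- from typing import List, Optional
--
-- def select_active_rows(height: int, phase_a_only: bool, lanes: Optional[int] = None) -> List[int]:
--     """Single strided range: stride 2 for phase A, bounded by min(height, stride*lanes)."""
--     step = 2 if phase_a_only else 1
--     stop = height
--     if lanes is not None and lanes > 0:
--         stop = min(height, step * lanes)
--     return list(range(0, stop, step))
-- ===== Notes on version B (the rewrite author's own statement) =====
-- stated objective: simpler
-- what changed: Replaces build-then-slice (comprehension filtering even rows, then rows[:lanes]) by one closed-form strided range with bound min(height, step*lanes), skipping the materialise-and-truncate pass.
import Mathlib
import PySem

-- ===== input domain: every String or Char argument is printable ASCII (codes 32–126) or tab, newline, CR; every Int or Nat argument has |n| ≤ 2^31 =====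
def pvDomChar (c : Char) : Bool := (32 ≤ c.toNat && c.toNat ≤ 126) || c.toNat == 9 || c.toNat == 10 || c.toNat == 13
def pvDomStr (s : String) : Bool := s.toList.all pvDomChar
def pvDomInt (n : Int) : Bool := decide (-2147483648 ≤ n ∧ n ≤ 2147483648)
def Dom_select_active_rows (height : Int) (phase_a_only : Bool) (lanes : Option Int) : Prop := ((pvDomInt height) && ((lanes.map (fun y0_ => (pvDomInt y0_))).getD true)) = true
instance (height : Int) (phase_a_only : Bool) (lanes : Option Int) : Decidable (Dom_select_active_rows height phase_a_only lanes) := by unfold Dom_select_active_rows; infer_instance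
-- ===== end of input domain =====

-- B replaces A's build-then-slice (filter even rows, then rows[:lanes]) by one strided
-- range(0, min(height, step*lanes), step); objective: simpler.


-- ===== PORT A =====
def select_active_rows (height : Int) (phase_a_only : Bool) (lanes : Option Int) : List Int :=
  let rows :=
    if phase_a_only then
      (PySem.List.pyRange 0 height 1).filter (fun y => PySem.Int.mod y 2 == 0)
    else
      PySem.List.pyRange 0 height 1
  match lanes with
  | some l => if 0 < l then PySem.List.slice rows none (some l) else rows
  | none => rows

-- ===== PORT B =====
def select_active_rows_alt (height : Int) (phase_a_only : Bool) (lanes : Option Int) : List Int :=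
  let step : Int := if phase_a_only then 2 else 1
  let stop : Int :=
    match lanes with
    | some l => if 0 < l then min height (step * l) else height
    | none => height
  PySem.List.pyRange 0 stop step

-- ===== PRECONDITION & SPEC =====
def Spec_select_active_rows (height : Int) (phase_a_only : Bool) (lanes : Option Int) (out : List Int) : Prop := out = select_active_rows_alt height phase_a_only lanes
instance (height : Int) (phase_a_only : Bool) (lanes : Option Int) (out : List Int) : Decidable (Spec_select_active_rows height phase_a_only lanes out) := by unfold Spec_select_active_rows; infer_instance

-- ===== CLAIM (what is proved, stated in full; the proofs are below) =====
def Claim_equal_select_active_rows : Prop := ∀ (height : Int) (phase_a_only : Bool) (lanes : Option Int), Dom_select_active_rows height phase_a_only lanes → Spec_select_active_rows height phase_a_only lanes (select_active_rows height phase_a_only lanes)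

-- ===== LEMMAS AND PROOFS =====

-- Filtering the even numbers out of range n keeps the first ⌈n/2⌉ even numbers.
lemma range_filter_even (n : Nat) :
    (List.range n).filter (fun k => k % 2 == 0)
      = (List.range ((n + 1) / 2)).map (fun k => 2 * k) := by
  induction n with
  | zero => simp
  | succ n ih =>
    rw [List.range_succ, List.filter_append, ih]
    by_cases hp : n % 2 = 0
    · have h2 : (n + 1 + 1) / 2 = (n + 1) / 2 + 1 := by omega
      have hn : 2 * ((n + 1) / 2) = n := by omega
      rw [h2, List.range_succ, List.map_append]
      simp [hp, hn]
    · have h2 : (n + 1 + 1) / 2 = (n + 1) / 2 := by omega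
      rw [h2]
      simp [hp]

-- The even-rows comprehension over range(height) is range(0, height, 2).
lemma filter_even_pyRange (h : Int) :
    (PySem.List.pyRange 0 h 1).filter (fun y => PySem.Int.mod y 2 == 0)
      = PySem.List.pyRange 0 h 2 := by
  rw [PySem.List.pyRange_of_pos 0 h (by norm_num : (0:Int) < 1),
      PySem.List.pyRange_of_pos 0 h (by norm_num : (0:Int) < 2),
      List.filter_map]
  have hp : ∀ k ∈ List.range (if 0 < h then ((h - 0 + 1 - 1) / 1).toNat else 0),
      ((fun y => PySem.Int.mod y 2 == 0) ∘ fun k : Nat => 0 + 1 * (k : Int)) k = (k % 2 == 0) := by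
    intro k _
    have hm := Int.fmod_eq_emod (a := (k : Int)) (b := 2)
    simp at hm
    simp [Function.comp, PySem.Int.mod, hm]
    omega
  rw [List.filter_congr hp, range_filter_even, List.map_map]
  have hf : ((fun k : Nat => 0 + 1 * (k : Int)) ∘ fun k : Nat => 2 * k)
      = fun k : Nat => 0 + 2 * (k : Int) := by
    funext k; simp only [Function.comp_apply]; push_cast; ring
  have hc : ((if 0 < h then ((h - 0 + 1 - 1) / 1).toNat else 0) + 1) / 2
      = if 0 < h then ((h - 0 + 2 - 1) / 2).toNat else 0 := by
    split_ifs with h0 <;> omega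
  rw [hf, hc]

-- rows[:lanes] of range(0, h, 1) is range(0, min(h, lanes), 1).
lemma take_pyRange_one (h l : Int) (hl : 0 < l) :
    (PySem.List.pyRange 0 h 1).take l.toNat = PySem.List.pyRange 0 (min h (1 * l)) 1 := by
  rw [PySem.List.pyRange_of_pos 0 h (by norm_num : (0:Int) < 1),
      PySem.List.pyRange_of_pos 0 (min h (1 * l)) (by norm_num : (0:Int) < 1),
      ← List.map_take, List.take_range]
  have hc : min l.toNat (if 0 < h then ((h - 0 + 1 - 1) / 1).toNat else 0)
      = if 0 < min h (1 * l) then ((min h (1 * l) - 0 + 1 - 1) / 1).toNat else 0 := by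
    split_ifs with h1 h2 <;> omega
  rw [hc]

-- rows[:lanes] of range(0, h, 2) is range(0, min(h, 2*lanes), 2).
lemma take_pyRange_two (h l : Int) (hl : 0 < l) :
    (PySem.List.pyRange 0 h 2).take l.toNat = PySem.List.pyRange 0 (min h (2 * l)) 2 := by
  rw [PySem.List.pyRange_of_pos 0 h (by norm_num : (0:Int) < 2),
      PySem.List.pyRange_of_pos 0 (min h (2 * l)) (by norm_num : (0:Int) < 2),
      ← List.map_take, List.take_range]
  have hc : min l.toNat (if 0 < h then ((h - 0 + 2 - 1) / 2).toNat else 0)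
      = if 0 < min h (2 * l) then ((min h (2 * l) - 0 + 2 - 1) / 2).toNat else 0 := by
    split_ifs with h1 h2 <;> omega
  rw [hc]

-- ===== VERDICT (by name: the statement is the Claim_ definition above) =====
theorem select_active_rows_spec : Claim_equal_select_active_rows := by
  intro h pa lanes _dom
  unfold Spec_select_active_rows select_active_rows select_active_rows_alt
  cases pa with
  | false =>
    cases lanes with
    | none => rfl
    | some l =>
      by_cases hl : 0 < l
      · simp only [Bool.false_eq_true, if_false, hl, if_true]
        rw [PySem.List.slice_to _ (le_of_lt hl), take_pyRange_one h l hl]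
      · simp only [Bool.false_eq_true, if_false, hl]
  | true =>
    cases lanes with
    | none => exact filter_even_pyRange h
    | some l =>
      by_cases hl : 0 < l
      · simp only [if_true, hl]
        rw [PySem.List.slice_to _ (le_of_lt hl), filter_even_pyRange h, take_pyRange_two h l hl]
      · simp only [if_true, hl, if_false]
        exact filter_even_pyRange h
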